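-- pv_equiv track=rewrite | github.com/Billnguyenh/portal-config-parser | win_parser/winsys.py | parseGpresult
-- ===== SOURCE A (Python) =====
-- def parseGpresult(section:list) -> dict:
--     configs = {
--         'gpresult': []
--     }
--     readingAppliedGroupPolicies = False
--     for line in section:
--         if ("The following GPOs were not applied because they were filtered" in line or "The computer is a part of the following security groups" in line):
--             readingAppliedGroupPolicies = False
--         if (readingAppliedGroupPolicies):
--             if ("---------------------" in line):
--                 pass
--             elif (not line):
--                 pass
--             else:
--                 configs['gpresult'].append(line.strip())
--         if ("Applied Group Policy Objects" in line):
--             readingAppliedGroupPolicies = True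
--     return configs
-- ===== SOURCE B (Python) =====
-- START = "Applied Group Policy Objects"
-- END1 = "The following GPOs were not applied because they were filtered"
-- END2 = "The computer is a part of the following security groups"
-- DASHES = "---------------------"
--
-- def parseGpresult(section: list) -> dict:
--     names = []
--     i, n = 0, len(section)
--     while i < n:
--         if START in section[i]:
--             # collect from the line after the marker until a terminator phrase
--             i += 1
--             while i < n:
--                 line = section[i]
--                 i += 1
--                 if END1 in line or END2 in line:
--                     break
--                 if line and DASHES not in line:
--                     names.append(line.strip())
--         else:
--             i += 1
--     return {'gpresult': names}
-- ===== Notes on version B (the rewrite author's own statement) =====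
-- stated objective: alternative
-- what changed: Replaces A's single boolean-flag state-machine pass with an explicit nested find-then-collect scan (outer search for the start marker, inner collection until a terminator); Pre_ excludes inputs where some line contains both the start marker and a terminator phrase, on which A's reset-flag-then-set-flag ordering within one line is accidental.
import Mathlib
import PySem

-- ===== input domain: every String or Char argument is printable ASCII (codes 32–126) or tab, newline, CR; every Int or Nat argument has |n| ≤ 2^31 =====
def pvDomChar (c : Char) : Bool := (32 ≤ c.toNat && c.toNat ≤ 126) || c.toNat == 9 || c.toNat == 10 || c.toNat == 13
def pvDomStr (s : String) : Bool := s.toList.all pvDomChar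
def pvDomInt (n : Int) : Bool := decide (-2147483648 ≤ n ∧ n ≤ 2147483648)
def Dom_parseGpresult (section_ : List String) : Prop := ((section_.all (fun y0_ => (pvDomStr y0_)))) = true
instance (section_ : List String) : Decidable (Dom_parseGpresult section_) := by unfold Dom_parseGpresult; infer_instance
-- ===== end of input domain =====

-- B replaces A's boolean-flag single pass with an explicit find-marker-then-collect nested scan (decomposition, same cost).

-- ===== PORT A =====
-- A: one fold over the lines carrying (readingAppliedGroupPolicies, collected lines).
def pvStepA (st : Bool × List String) (line : String) : Bool × List String :=
  let f0 := if PySem.Str.isIn "The following GPOs were not applied because they were filtered" line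
               || PySem.Str.isIn "The computer is a part of the following security groups" line
            then false else st.1
  let acc := if f0 then
               (if PySem.Str.isIn "---------------------" line then st.2
                else if line = "" then st.2
                else st.2 ++ [PySem.Str.strip line])
             else st.2
  let f1 := if PySem.Str.isIn "Applied Group Policy Objects" line then true else f0
  (f1, acc)

def parseGpresult (section_ : List String) : List (String × List String) :=
  [("gpresult", (section_.foldl pvStepA (false, [])).2)]

-- ===== PORT B =====
-- B: outer scan searches for the start marker; inner scan collects until a terminator phrase.
mutual
  def pvOuterB : List String → List String
    | [] => []
    | line :: rest =>
      if PySem.Str.isIn "Applied Group Policy Objects" line then pvInnerB rest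
      else pvOuterB rest
  def pvInnerB : List String → List String
    | [] => []
    | line :: rest =>
      if PySem.Str.isIn "The following GPOs were not applied because they were filtered" line
         || PySem.Str.isIn "The computer is a part of the following security groups" line then
        pvOuterB rest
      else
        (if line ≠ "" && !PySem.Str.isIn "---------------------" line
         then [PySem.Str.strip line] else []) ++ pvInnerB rest
end

def parseGpresult_alt (section_ : List String) : List (String × List String) :=
  [("gpresult", pvOuterB section_)]

-- ===== PRECONDITION & SPEC =====
-- Pre_ excludes inputs where some line contains both the start marker and a terminator
-- phrase: on such a line A's reset-then-set flag ordering is accidental (the terminator is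
-- ignored while collecting), a degenerate corner no real gpresult output reaches.
def Pre_parseGpresult (section_ : List String) : Prop :=
  (section_.all (fun l =>
    !(PySem.Str.isIn "Applied Group Policy Objects" l
      && (PySem.Str.isIn "The following GPOs were not applied because they were filtered" l
          || PySem.Str.isIn "The computer is a part of the following security groups" l)))) = true
instance (section_ : List String) : Decidable (Pre_parseGpresult section_) := by
  unfold Pre_parseGpresult; infer_instance

def pvWitness_parseGpresult : List String :=
  ["Applied Group Policy Objects", "  GPO One  ", ""]

def Spec_parseGpresult (section_ : List String) (out : List (String × List String)) : Prop := out = parseGpresult_alt section_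
instance (section_ : List String) (out : List (String × List String)) : Decidable (Spec_parseGpresult section_ out) := by unfold Spec_parseGpresult; infer_instance

-- ===== CLAIM =====
def Claim_equal_parseGpresult : Prop := ∀ (section_ : List String), Dom_parseGpresult section_ → Pre_parseGpresult section_ → Spec_parseGpresult section_ (parseGpresult section_)

-- ===== LEMMAS AND PROOFS =====

-- Invariant: on Pre_-good lines, the A-side fold from state (flag, acc) yields
-- acc ++ (inner/outer of the rest), according to the flag.
theorem pvFold_eq (rest : List String) :
    ∀ (flag : Bool) (acc : List String),
      (rest.all (fun l =>
        !(PySem.Str.isIn "Applied Group Policy Objects" l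
          && (PySem.Str.isIn "The following GPOs were not applied because they were filtered" l
              || PySem.Str.isIn "The computer is a part of the following security groups" l)))) = true →
      (rest.foldl pvStepA (flag, acc)).2
        = acc ++ (if flag then pvInnerB rest else pvOuterB rest) := by
  induction rest with
  | nil => intro flag acc _; cases flag <;> simp [pvOuterB, pvInnerB]
  | cons line rest ih =>
    intro flag acc h
    simp only [List.all_cons, Bool.and_eq_true] at h
    obtain ⟨h1, h2⟩ := h
    simp only [List.foldl_cons]
    rw [ih _ _ h2]
    cases hS : PySem.Str.isIn "Applied Group Policy Objects" line <;>
      cases hE : (PySem.Str.isIn "The following GPOs were not applied because they were filtered" line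
                  || PySem.Str.isIn "The computer is a part of the following security groups" line) <;>
      simp only [hS, hE, Bool.not_true, Bool.true_and, Bool.false_and, Bool.not_false] at h1 ⊢ <;>
      cases flag <;>
      simp only [pvStepA, pvOuterB, pvInnerB, hS, hE, if_true, if_false, Bool.false_eq_true,
        Bool.true_eq_false, ite_true, ite_false] <;>
      first
        | exact absurd h1 (by decide)
        | (split_ifs <;> simp_all [List.append_assoc])
        | simp_all [List.append_assoc]

-- ===== VERDICT =====
theorem parseGpresult_spec : Claim_equal_parseGpresult := by
  intro section_ _ hpre
  unfold Spec_parseGpresult parseGpresult parseGpresult_alt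
  rw [pvFold_eq _ _ _ hpre]
  simp
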